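-- pv_equiv track=rewrite | github.com/code4aLiving/data_structures_algorithms | hackerrank/python/shift-in-place.py | shift_in_place
-- ===== SOURCE A (Python) =====
-- def shift_in_place(l,n):
--     n = n % len(l)
--     temp = l[0]
--     i = n
--     while i > 0:
--         temp2 = l[i]
--         l[i] = temp
--         temp = temp2
--         i = i + n if i + n < len(l) else i + n - len(l)
--     l[i]=temp
--     return l
-- ===== SOURCE B (Python) =====
-- def shift_in_place(l, n):
--     L = len(l)
--     n = n % L
--     idx = [0]
--     j = n
--     while j != 0:
--         idx.append(j)
--         j = (j + n) % L
--     vals = [l[j] for j in idx]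
--     for j, v in zip(idx, [vals[-1]] + vals[:-1]):
--         l[j] = v
--     return l
-- ===== Notes on version B (the rewrite author's own statement) =====
-- stated objective: alternative
-- what changed: A chases the cycle containing index 0 in place, carrying one element in a temp variable and overwriting as it walks; B first materialises the orbit index list [0, n, 2n mod L, ...], snapshots the values at those indices, and then writes the snapshot back rotated by one position (gather-then-scatter instead of a carried-temp walk).
import Mathlib
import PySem

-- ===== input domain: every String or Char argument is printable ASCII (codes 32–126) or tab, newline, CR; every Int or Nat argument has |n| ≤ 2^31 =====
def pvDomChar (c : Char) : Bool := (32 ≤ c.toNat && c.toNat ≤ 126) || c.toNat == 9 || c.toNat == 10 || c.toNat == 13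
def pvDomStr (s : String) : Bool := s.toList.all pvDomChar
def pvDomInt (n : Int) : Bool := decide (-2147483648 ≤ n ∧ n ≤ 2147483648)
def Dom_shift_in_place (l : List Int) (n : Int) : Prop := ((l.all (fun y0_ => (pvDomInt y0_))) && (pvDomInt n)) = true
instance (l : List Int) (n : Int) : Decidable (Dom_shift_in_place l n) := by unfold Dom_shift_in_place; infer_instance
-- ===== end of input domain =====

-- B re-implements A's single-cycle shift as gather-then-scatter over the explicit orbit
-- (same cost, 'alternative'); both Pythons mutate l in place, the equivalence proved is about the return value.

-- ===== PORT A =====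
-- A's while-loop; fuel is decremented each iteration (l.length iterations always suffice, proved below)
def shiftLoopA (L n : Int) : Nat → List Int → Int → Int → List Int
  | 0, l, _, _ => l
  | fuel+1, l, temp, i =>
    if i > 0 then
      let temp2 := PySem.List.pyGetD l i 0
      let l' := PySem.List.pySetD l i temp
      let i' := if i + n < L then i + n else i + n - L
      shiftLoopA L n fuel l' temp2 i'
    else
      PySem.List.pySetD l i temp

def shift_in_place (l : List Int) (n : Int) : List Int :=
  if (l.length : Int) = 0 then []  -- Python raises ZeroDivisionError at n % len(l); excluded by Pre_
  else
    let n' := PySem.Int.mod n (l.length : Int)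
    let temp := PySem.List.pyGetD l 0 0
    shiftLoopA (l.length : Int) n' l.length l temp n'

-- ===== PORT B =====
-- B's orbit-collecting while-loop; fuel as above (l.length appends always suffice, proved below)
def idxLoopB (L n : Int) : Nat → List Int → Int → List Int
  | 0, idx, _ => idx
  | fuel+1, idx, j =>
    if j ≠ 0 then idxLoopB L n fuel (idx ++ [j]) (PySem.Int.mod (j + n) L)
    else idx

def shift_in_place_alt (l : List Int) (n : Int) : List Int :=
  if (l.length : Int) = 0 then []  -- Python raises ZeroDivisionError at n % L; excluded by Pre_
  else
    let L : Int := l.length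
    let n' := PySem.Int.mod n L
    let idx := idxLoopB L n' l.length [0] n'
    let vals := idx.map (fun j => PySem.List.pyGetD l j 0)
    (idx.zip (PySem.List.pyGetD vals (-1) 0 :: PySem.List.slice vals none (some (-1)))).foldl
      (fun acc p => PySem.List.pySetD acc p.1 p.2) l

-- ===== PRECONDITION & SPEC =====
-- Pre_ excludes only the empty list, on which both Pythons raise ZeroDivisionError (n % 0).
def Pre_shift_in_place (l : List Int) (n : Int) : Prop := l ≠ []
instance (l : List Int) (n : Int) : Decidable (Pre_shift_in_place l n) := by unfold Pre_shift_in_place; infer_instance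
def pvWitness_shift_in_place : List Int × Int := ([1, 2, 3], 1)

def Spec_shift_in_place (l : List Int) (n : Int) (out : List Int) : Prop := out = shift_in_place_alt l n
instance (l : List Int) (n : Int) (out : List Int) : Decidable (Spec_shift_in_place l n out) := by unfold Spec_shift_in_place; infer_instance

-- ===== CLAIM (what is proved, stated in full; the proofs are below) =====
def Claim_equal_shift_in_place : Prop := ∀ (l : List Int) (n : Int), Dom_shift_in_place l n → Pre_shift_in_place l n → Spec_shift_in_place l n (shift_in_place l n)

-- ===== LEMMAS AND PROOFS =====

-- the orbit of index 0 under repeated +n (mod L): xseq n L k = (k*n) mod L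
def xseq (n L : Int) (k : Nat) : Int := ((k : Int) * n) % L

-- the orbit indices x_k, x_{k+1}, …, x_{m-1}
def orbIdx (n L : Int) (k m : Nat) : List Int := (List.range' k (m - k)).map (xseq n L)

-- the sequence of writes both programs perform
def scatter (l : List Int) (ps : List (Int × Int)) : List Int :=
  ps.foldl (fun acc p => PySem.List.pySetD acc p.1 p.2) l

theorem xseq_nonneg (n L : Int) (hL : 0 < L) (k : Nat) : 0 ≤ xseq n L k :=
  Int.emod_nonneg _ (by omega)

theorem xseq_lt (n L : Int) (hL : 0 < L) (k : Nat) : xseq n L k < L :=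
  Int.emod_lt_of_pos _ hL

theorem xseq_succ (n L : Int) (k : Nat) :
    xseq n L (k + 1) = (xseq n L k + n) % L := by
  unfold xseq
  rw [Int.emod_add_emod]
  push_cast
  ring_nf

theorem xseq_distinct (n L : Int) (m : Nat)
    (hmin : ∀ t : Nat, 0 < t → t < m → xseq n L t ≠ 0)
    (a b : Nat) (ha : 0 < a) (hab : a < b) (hb : b < m) : xseq n L a ≠ xseq n L b := by
  intro h
  have hd : xseq n L (b - a) = 0 := by
    unfold xseq at *
    have : ((b : Int) * n - (a : Int) * n) % L = 0 :=
      (Int.emod_eq_emod_iff_emod_sub_eq_zero.mp h.symm)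
    have hcast : ((b - a : Nat) : Int) = (b : Int) - (a : Int) := by push_cast; omega
    rw [hcast, sub_mul]
    exact this
  exact hmin (b - a) (by omega) (by omega) hd

theorem pyGetD_pySetD_ne (l : List Int) (a e w d : Int) (ha : 0 ≤ a) (he : 0 ≤ e)
    (hne : e ≠ a) : PySem.List.pyGetD (PySem.List.pySetD l a w) e d = PySem.List.pyGetD l e d := by
  rw [PySem.List.pySetD_of_nonneg _ _ ha]
  by_cases hr : e < (l.length : Int)
  · rw [PySem.List.pyGetD_eq_getElem _ d he (by simpa using hr),
        PySem.List.pyGetD_eq_getElem _ d he hr]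
    have hne' : a.toNat ≠ e.toNat := by omega
    exact List.getElem_set_ne hne' _
  · rw [PySem.List.pyGetD_of_none _ _ _ ?h1, PySem.List.pyGetD_of_none _ _ _ ?h2]
    case h1 => rw [PySem.List.pyGet?_eq_none_iff]; simp [PySem.Raise.InRange]; omega
    case h2 => rw [PySem.List.pyGet?_eq_none_iff]; simp [PySem.Raise.InRange]; omega

theorem pySetD_comm (l : List Int) (a b va vb : Int) (ha : 0 ≤ a) (hb : 0 ≤ b) (hne : a ≠ b) :
    PySem.List.pySetD (PySem.List.pySetD l a va) b vb
      = PySem.List.pySetD (PySem.List.pySetD l b vb) a va := by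
  rw [PySem.List.pySetD_of_nonneg _ _ ha, PySem.List.pySetD_of_nonneg _ _ hb,
      PySem.List.pySetD_of_nonneg _ _ hb, PySem.List.pySetD_of_nonneg _ _ ha]
  exact List.set_comm _ _ (by omega)

theorem scatter_snoc (ps : List (Int × Int)) (l : List Int) (p w : Int) (hp : 0 ≤ p)
    (h : ∀ q ∈ ps, 0 ≤ q.1 ∧ q.1 ≠ p) :
    scatter l (ps ++ [(p, w)]) = scatter (PySem.List.pySetD l p w) ps := by
  induction ps generalizing l with
  | nil => rfl
  | cons q ps ih =>
    have hq := h q (List.mem_cons_self)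
    show scatter (PySem.List.pySetD l q.1 q.2) (ps ++ [(p, w)]) = _
    rw [ih _ (fun r hr => h r (List.mem_cons_of_mem _ hr))]
    show scatter _ ps = scatter (PySem.List.pySetD (PySem.List.pySetD l p w) q.1 q.2) ps
    rw [pySetD_comm l q.1 p q.2 w hq.1 hp hq.2]

theorem stepA_eq (L n j : Int) (hL : 0 < L) (hn : 0 ≤ n) (hnL : n < L) (hj : 0 ≤ j) (hjL : j < L) :
    (if j + n < L then j + n else j + n - L) = (j + n) % L := by
  split_ifs with h
  · exact (Int.emod_eq_of_lt (by omega) h).symm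
  · rw [← Int.sub_emod_right (j + n) L, Int.emod_eq_of_lt (by omega) (by omega)]

theorem orbIdx_cons (n L : Int) (k m : Nat) (hkm : k < m) :
    orbIdx n L k m = xseq n L k :: orbIdx n L (k + 1) m := by
  unfold orbIdx
  rw [show m - k = (m - (k + 1)) + 1 by omega, List.range'_succ, List.map_cons]

theorem mem_orbIdx (n L : Int) (k m : Nat) (hkm : k ≤ m) (e : Int) (he : e ∈ orbIdx n L k m) :
    ∃ t : Nat, k ≤ t ∧ t < m ∧ e = xseq n L t := by
  unfold orbIdx at he
  obtain ⟨t, ht, rfl⟩ := List.mem_map.mp he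
  exact ⟨t, by simpa using (List.mem_range'_1.mp ht).1,
    by have := (List.mem_range'_1.mp ht).2; omega, rfl⟩

-- A's loop, started at orbit point x_k, performs exactly the chain of writes 'scatter'
theorem loopA_eq (n L : Int) (hL : 0 < L) (hn : 0 ≤ n) (hnL : n < L) (m : Nat)
    (hm0 : xseq n L m = 0) (hmin : ∀ t : Nat, 0 < t → t < m → xseq n L t ≠ 0) :
    ∀ (d : Nat) (k : Nat) (l : List Int) (temp : Int), 0 < k → k ≤ m → m - k < d →
    shiftLoopA L n d l temp (xseq n L k) =
      scatter l ((orbIdx n L k m ++ [0]).zip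
        (temp :: (orbIdx n L k m).map (fun e => PySem.List.pyGetD l e 0))) := by
  intro d
  induction d with
  | zero => intro k l temp hk hkm hd; omega
  | succ d ih =>
    intro k l temp hk hkm hd
    by_cases hkmeq : k = m
    · have hz : orbIdx n L k m = [] := by
        unfold orbIdx; rw [show m - k = 0 by omega]; rfl
      have hx0 : xseq n L k = 0 := by rw [hkmeq]; exact hm0
      rw [hz, hx0]
      simp [shiftLoopA, scatter]
    · have hklt : k < m := by omega
      have hxne : xseq n L k ≠ 0 := hmin k hk hklt
      have hxpos : 0 < xseq n L k := by
        have := xseq_nonneg n L hL k; omega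
      rw [orbIdx_cons n L k m hklt]
      show shiftLoopA L n (d + 1) l temp (xseq n L k) = _
      rw [shiftLoopA]
      rw [if_pos (by exact_mod_cast hxpos)]
      have hstep : (if xseq n L k + n < L then xseq n L k + n else xseq n L k + n - L)
          = xseq n L (k + 1) := by
        rw [stepA_eq L n _ hL hn hnL (xseq_nonneg n L hL k) (xseq_lt n L hL k),
          xseq_succ n L k]
      rw [hstep]
      rw [ih (k + 1) (PySem.List.pySetD l (xseq n L k) temp) (PySem.List.pyGetD l (xseq n L k) 0)
        (by omega) (by omega) (by omega)]
      have hmaps : (orbIdx n L (k + 1) m).map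
            (fun e => PySem.List.pyGetD (PySem.List.pySetD l (xseq n L k) temp) e 0)
          = (orbIdx n L (k + 1) m).map (fun e => PySem.List.pyGetD l e 0) := by
        apply List.map_congr_left
        intro e he
        obtain ⟨t, ht1, ht2, rfl⟩ := mem_orbIdx n L (k + 1) m (by omega) e he
        exact pyGetD_pySetD_ne l (xseq n L k) (xseq n L t) temp 0
          (xseq_nonneg n L hL k) (xseq_nonneg n L hL t)
          (Ne.symm (xseq_distinct n L m hmin k t hk (by omega) ht2))
      rw [hmaps]
      rfl

-- B's index loop collects exactly the orbit indices
theorem idxLoopB_eq (n L : Int) (hL : 0 < L) (m : Nat)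
    (hm0 : xseq n L m = 0) (hmin : ∀ t : Nat, 0 < t → t < m → xseq n L t ≠ 0) :
    ∀ (d : Nat) (k : Nat) (acc : List Int), 0 < k → k ≤ m → m - k ≤ d →
    idxLoopB L n d acc (xseq n L k) = acc ++ orbIdx n L k m := by
  intro d
  induction d with
  | zero =>
    intro k acc hk hkm hd
    have hz : orbIdx n L k m = [] := by
      unfold orbIdx; rw [show m - k = 0 by omega]; rfl
    rw [hz]
    simp [idxLoopB]
  | succ d ih =>
    intro k acc hk hkm hd
    by_cases hkmeq : k = m
    · have hz : orbIdx n L k m = [] := by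
        unfold orbIdx; rw [show m - k = 0 by omega]; rfl
      have hx0 : xseq n L k = 0 := by rw [hkmeq]; exact hm0
      rw [hz, hx0]
      simp [idxLoopB]
    · have hklt : k < m := by omega
      have hxne : xseq n L k ≠ 0 := hmin k hk hklt
      rw [idxLoopB, if_pos hxne]
      have hstep : PySem.Int.mod (xseq n L k + n) L = xseq n L (k + 1) := by
        rw [PySem.Int.mod_eq_emod_of_pos hL, xseq_succ n L k]
      rw [hstep, ih (k + 1) (acc ++ [xseq n L k]) (by omega) (by omega) (by omega),
        orbIdx_cons n L k m hklt]
      simp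

theorem zip_snoc_split (as bs : List Int) (a0 : Int) (h : bs.length = as.length + 1) :
    ∃ hne : bs ≠ [],
    (as ++ [a0]).zip bs = as.zip bs.dropLast ++ [(a0, bs.getLast hne)] := by
  induction as generalizing bs with
  | nil =>
    match bs, h with
    | [b], _ => exact ⟨by simp, by simp⟩
  | cons a as ih =>
    match bs, h with
    | b :: bs, h =>
      have hlen : bs.length = as.length + 1 := by simpa using h
      obtain ⟨hne, heq⟩ := ih bs hlen
      refine ⟨by simp, ?_⟩
      rw [List.cons_append, List.zip_cons_cons, heq,
          List.dropLast_cons_of_ne_nil hne, List.zip_cons_cons,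
          List.getLast_cons hne]
      rfl

-- ===== VERDICT (by name: the statement is the Claim_ definition above) =====
theorem shift_in_place_spec : Claim_equal_shift_in_place := by
  intro l n _ hpre
  unfold Spec_shift_in_place
  have hlen : 0 < l.length := List.length_pos_of_ne_nil hpre
  have hL : 0 < (l.length : Int) := by exact_mod_cast hlen
  have hLne : ¬ ((l.length : Int) = 0) := by omega
  set L : Int := (l.length : Int) with hLdef
  set n' : Int := PySem.Int.mod n L with hn'def
  have hn0 : 0 ≤ n' := PySem.Int.mod_nonneg n hL
  have hnL : n' < L := PySem.Int.mod_lt n hL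
  -- the minimal positive m with (m*n') % L = 0
  have hex : ∃ k : Nat, 0 < k ∧ xseq n' L k = 0 := by
    refine ⟨l.length, hlen, ?_⟩
    unfold xseq
    exact Int.mul_emod_right L n'
  set m : Nat := Nat.find hex with hmdef
  have hm : 0 < m ∧ xseq n' L m = 0 := Nat.find_spec hex
  have hmin : ∀ t : Nat, 0 < t → t < m → xseq n' L t ≠ 0 :=
    fun t h0 hlt hx => Nat.find_min hex hlt ⟨h0, hx⟩
  have hmle : m ≤ l.length := Nat.find_min' hex ⟨hlen, by unfold xseq; exact Int.mul_emod_right L n'⟩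
  have x1 : xseq n' L 1 = n' := by
    unfold xseq
    rw [Nat.cast_one, one_mul]
    exact Int.emod_eq_of_lt hn0 hnL
  -- abbreviations for the orbit and the gathered values
  set orb : List Int := orbIdx n' L 1 m with horbdef
  set vals : List Int := (0 :: orb).map (fun j => PySem.List.pyGetD l j 0) with hvalsdef
  have hvlen : vals.length = orb.length + 1 := by simp [hvalsdef]
  obtain ⟨hvne, hsplit⟩ := zip_snoc_split orb vals 0 hvlen
  have horb_mem : ∀ e ∈ orb, 0 ≤ e ∧ e ≠ 0 := by
    intro e he
    obtain ⟨t, ht1, ht2, rfl⟩ := mem_orbIdx n' L 1 m (by omega) e he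
    exact ⟨xseq_nonneg n' L hL t, hmin t (by omega) ht2⟩
  -- A's side
  have hA : shift_in_place l n
      = scatter l ((orb ++ [0]).zip vals) := by
    show (if (l.length : Int) = 0 then [] else _) = _
    rw [if_neg hLne]
    show shiftLoopA L n' l.length l (PySem.List.pyGetD l 0 0) n' = _
    have hloop := loopA_eq n' L hL hn0 hnL m hm.2 hmin l.length 1 l
        (PySem.List.pyGetD l 0 0) Nat.one_pos (by omega) (by omega)
    rw [x1] at hloop
    rw [hloop]
    rfl
  -- B's side
  have hB : shift_in_place_alt l n
      = scatter l (((0 : Int) :: orb).zip (vals.getLast hvne :: vals.dropLast)) := by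
    show (if (l.length : Int) = 0 then [] else _) = _
    rw [if_neg hLne]
    show ((idxLoopB L n' l.length [0] n').zip
        (PySem.List.pyGetD ((idxLoopB L n' l.length [0] n').map (fun j => PySem.List.pyGetD l j 0)) (-1) 0
          :: PySem.List.slice ((idxLoopB L n' l.length [0] n').map (fun j => PySem.List.pyGetD l j 0)) none (some (-1)))).foldl
        (fun acc p => PySem.List.pySetD acc p.1 p.2) l = _
    have hidx : idxLoopB L n' l.length [0] n' = (0 : Int) :: orb := by
      have hloop := idxLoopB_eq n' L hL m hm.2 hmin l.length 1 [0]
          Nat.one_pos (by omega) (by omega)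
      rw [x1] at hloop
      rw [hloop]
      rfl
    rw [hidx]
    rw [show ((0 : Int) :: orb).map (fun j => PySem.List.pyGetD l j 0) = vals from rfl]
    rw [PySem.List.pyGetD_neg_one vals 0 hvne, PySem.List.slice_to_neg_one vals]
    rfl
  rw [hA, hB, hsplit]
  rw [List.zip_cons_cons]
  show scatter l (orb.zip vals.dropLast ++ [(0, vals.getLast hvne)])
      = scatter (PySem.List.pySetD l 0 (vals.getLast hvne)) (orb.zip vals.dropLast)
  rw [scatter_snoc _ _ _ _ le_rfl]
  intro q hq
  have hq1 : q.1 ∈ orb := (List.of_mem_zip hq).1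
  exact horb_mem q.1 hq1
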